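-- pv_equiv track=rewrite | github.com/raitk3/Python | pr14_exam/exam.py | add_or_subtract
-- ===== SOURCE A (Python) =====
-- def add_or_subtract(numbers):
--     """
--     Return the sum of all numbers in a list.
--
--     The sum is calculated according to following rules:
--         -always start by adding all the numbers together.
--         -if you find a 0, start subtracting all following numbers until you find another 0, then start adding again.
--         -there might be more than two 0 in a list - change +/- with every 0 you find.
--
--     For example:
--         [1, 2, 0, 3, 0, 4] -> 1 + 2 - 3 + 4 = 4
--         [0, 2, 1, 0, 1, 0, 2] -> -2 - 1 + 1 - 2 = -4
--         [1, 2] -> 1 + 2 = 3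
--         [4, 0, 2, 3] = 4 - 2 - 3 = -1
--
--     #2
--
--     :param numbers: the list of number given.
--     :return: the sum of all numbers.
--     """
--     zero_count = 0
--     sum = 0
--     for num in numbers:
--         if num == 0:
--             zero_count += 1
--         else:
--             if zero_count % 2 == 0:
--                 sum += num
--             elif zero_count % 2 == 1:
--                 sum -= num
--     return sum
-- ===== SOURCE B (Python) =====
-- def add_or_subtract(numbers):
--     # Split into segments separated by zeros, then fold segment sums
--     # with alternating signs: seg0 - seg1 + seg2 - ...
--     segments = [[]]
--     for num in numbers:
--         if num == 0:
--             segments.append([])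
--         else:
--             segments[-1].append(num)
--     total = 0
--     sign = 1
--     for seg in segments:
--         total += sign * sum(seg)
--         sign = -sign
--     return total
-- ===== Notes on version B (the rewrite author's own statement) =====
-- stated objective: alternative
-- what changed: B first splits the list into zero-delimited segments and then folds the segment sums with alternating signs, instead of A's single pass tracking a running zero-count parity.
import Mathlib
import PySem

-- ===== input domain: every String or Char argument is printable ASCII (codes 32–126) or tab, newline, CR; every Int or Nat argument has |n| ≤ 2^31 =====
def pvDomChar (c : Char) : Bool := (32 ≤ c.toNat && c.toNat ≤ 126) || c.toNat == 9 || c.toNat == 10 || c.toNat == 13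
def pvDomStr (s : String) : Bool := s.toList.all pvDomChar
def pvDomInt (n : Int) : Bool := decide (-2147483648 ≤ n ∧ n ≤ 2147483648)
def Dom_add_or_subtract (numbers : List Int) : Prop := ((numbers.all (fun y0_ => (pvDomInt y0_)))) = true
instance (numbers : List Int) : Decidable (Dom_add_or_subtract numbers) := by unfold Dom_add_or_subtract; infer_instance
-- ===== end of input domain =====

-- B splits the list into zero-delimited segments and folds segment sums with alternating signs (alternative decomposition, same cost).


-- ===== PORT A =====
-- loop state: (zero_count, sum); one iteration of A's for-loop
def pvAStep (st : Int × Int) (num : Int) : Int × Int :=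
  if num == 0 then (st.1 + 1, st.2)
  else if st.1 % 2 == 0 then (st.1, st.2 + num)
  else if st.1 % 2 == 1 then (st.1, st.2 - num)
  else st

def add_or_subtract (numbers : List Int) : Int :=
  (numbers.foldl pvAStep (0, 0)).2

-- ===== PORT B =====
-- segment-building state: (finished segments, current segment)
def pvSegStep (st : List (List Int) × List Int) (num : Int) : List (List Int) × List Int :=
  if num == 0 then (st.1 ++ [st.2], []) else (st.1, st.2 ++ [num])

def add_or_subtract_alt (numbers : List Int) : Int :=
  let st := numbers.foldl pvSegStep ([], [])
  let segments := st.1 ++ [st.2]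
  (segments.foldl (fun (acc : Int × Int) seg => (acc.1 + acc.2 * seg.sum, -acc.2)) (0, 1)).1

-- ===== PRECONDITION & SPEC =====
def Spec_add_or_subtract (numbers : List Int) (out : Int) : Prop := out = add_or_subtract_alt numbers
instance (numbers : List Int) (out : Int) : Decidable (Spec_add_or_subtract numbers out) := by unfold Spec_add_or_subtract; infer_instance

-- ===== CLAIM (what is proved, stated in full; the proofs are below) =====
def Claim_equal_add_or_subtract : Prop := ∀ (numbers : List Int), Dom_add_or_subtract numbers → Spec_add_or_subtract numbers (add_or_subtract numbers)

-- ===== LEMMAS AND PROOFS =====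

-- signed sum: add until a zero flips the sign of the remainder
def pvG : List Int → Int
  | [] => 0
  | n :: t => if n = 0 then - pvG t else n + pvG t

-- alternating sum of segment sums
def pvAlt : List (List Int) → Int
  | [] => 0
  | s :: r => s.sum - pvAlt r

theorem pvA_loop (l : List Int) : ∀ (zc s : Int), 0 ≤ zc →
    (l.foldl pvAStep (zc, s)).2 = s + (if zc % 2 = 0 then pvG l else - pvG l) := by
  induction l with
  | nil => intro zc s _; simp [pvG]
  | cons n t ih =>
    intro zc s hzc
    rw [List.foldl_cons]
    by_cases hn : n = 0
    · subst hn
      have hstep : pvAStep (zc, s) 0 = (zc + 1, s) := by simp [pvAStep]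
      rw [hstep, ih (zc + 1) s (by omega)]
      have h2 : zc % 2 = 0 ∨ zc % 2 = 1 := by omega
      rcases h2 with h | h
      · simp [pvG, h, (by omega : (zc + 1) % 2 = 1)]
      · simp [pvG, h, (by omega : (zc + 1) % 2 = 0)]
    · have h2 : zc % 2 = 0 ∨ zc % 2 = 1 := by omega
      rcases h2 with h | h
      · have hstep : pvAStep (zc, s) n = (zc, s + n) := by simp [pvAStep, hn, h]
        rw [hstep, ih zc (s + n) hzc]
        simp [pvG, hn, h]; ring
      · have hstep : pvAStep (zc, s) n = (zc, s - n) := by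
          simp [pvAStep, hn, h]
        rw [hstep, ih zc (s - n) hzc]
        simp [pvG, hn, h]; ring

theorem pvAlt_append_single (d : List (List Int)) (x : List Int) :
    pvAlt (d ++ [x]) = pvAlt d + (if d.length % 2 = 0 then x.sum else - x.sum) := by
  induction d with
  | nil => simp [pvAlt]
  | cons s r ih =>
    simp only [List.cons_append, pvAlt, ih, List.length_cons]
    have h2 : r.length % 2 = 0 ∨ r.length % 2 = 1 := by omega
    rcases h2 with h | h
    · simp [h, (by omega : (r.length + 1) % 2 = 1)]; omega
    · simp [h, (by omega : (r.length + 1) % 2 = 0)]; omega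

theorem pvB_seg (l : List Int) : ∀ (done : List (List Int)) (cur : List Int),
    (let st := l.foldl pvSegStep (done, cur); pvAlt (st.1 ++ [st.2])) =
      pvAlt done + (if done.length % 2 = 0 then cur.sum + pvG l else - (cur.sum + pvG l)) := by
  induction l with
  | nil =>
    intro done cur
    simp only [List.foldl_nil, pvAlt_append_single, pvG]
    split_ifs <;> simp
  | cons n t ih =>
    intro done cur
    by_cases hn : n = 0
    · subst hn
      simp only [List.foldl_cons, pvSegStep, beq_self_eq_true, if_true]
      rw [ih (done ++ [cur]) []]
      rw [pvAlt_append_single]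
      have h2 : done.length % 2 = 0 ∨ done.length % 2 = 1 := by omega
      rcases h2 with h | h
      · simp [pvG, h, List.length_append, (by omega : (done.length + 1) % 2 = 1)]; omega
      · simp [pvG, h, List.length_append, (by omega : (done.length + 1) % 2 = 0)]; omega
    · simp only [List.foldl_cons, pvSegStep, beq_iff_eq, hn, if_false]
      rw [ih done (cur ++ [n])]
      simp only [List.sum_append, List.sum_cons, List.sum_nil, pvG, hn, if_false]
      split_ifs <;> ring

theorem pvB_total (segs : List (List Int)) : ∀ (t sg : Int),
    (segs.foldl (fun (acc : Int × Int) seg => (acc.1 + acc.2 * seg.sum, -acc.2)) (t, sg)).1 =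
      t + sg * pvAlt segs := by
  induction segs with
  | nil => intro t sg; simp [pvAlt]
  | cons s r ih =>
    intro t sg
    simp only [List.foldl_cons, pvAlt, ih]
    ring

-- ===== VERDICT (by name: the statement is the Claim_ definition above) =====
theorem add_or_subtract_spec : Claim_equal_add_or_subtract := by
  intro numbers _
  unfold Spec_add_or_subtract add_or_subtract add_or_subtract_alt
  rw [pvA_loop numbers 0 0 le_rfl, pvB_total]
  have := pvB_seg numbers [] []
  simp only [pvAlt, List.length_nil, List.sum_nil] at this ⊢
  rw [this]
  simp
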